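-- pv_equiv track=rewrite | github.com/andrewchantzos/AoC | src/aoc2023/day14.py | move_Os_left
-- ===== SOURCE A (Python) =====
-- def move_Os_left(lst):
--     for i, el in enumerate(lst):
--         if el != "O":
--             continue
--         for j in range(i - 1, -1, -1):
--             if lst[j] == "#":
--                 break
--             lst[j], lst[j + 1] = lst[j + 1], lst[j]
--     return lst
-- ===== SOURCE B (Python) =====
-- def move_Os_left(lst):
--     done = []
--     os_count = 0
--     pending = []
--     for x in lst:
--         if x == "#":
--             done += ["O"] * os_count + pending + ["#"]
--             os_count = 0
--             pending = []
--         elif x == "O":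
--             os_count += 1
--         else:
--             pending.append(x)
--     return done + ["O"] * os_count + pending
-- ===== Notes on version B (the rewrite author's own statement) =====
-- stated objective: alternative
-- what changed: Replaces A's per-'O' leftward bubble of adjacent swaps (scanning back to the previous '#') with a single left-to-right pass that accumulates, per '#'-delimited segment, an 'O' count and the pending non-'O' elements, concatenating segments as it goes; B also does not mutate its argument.
import Mathlib
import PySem

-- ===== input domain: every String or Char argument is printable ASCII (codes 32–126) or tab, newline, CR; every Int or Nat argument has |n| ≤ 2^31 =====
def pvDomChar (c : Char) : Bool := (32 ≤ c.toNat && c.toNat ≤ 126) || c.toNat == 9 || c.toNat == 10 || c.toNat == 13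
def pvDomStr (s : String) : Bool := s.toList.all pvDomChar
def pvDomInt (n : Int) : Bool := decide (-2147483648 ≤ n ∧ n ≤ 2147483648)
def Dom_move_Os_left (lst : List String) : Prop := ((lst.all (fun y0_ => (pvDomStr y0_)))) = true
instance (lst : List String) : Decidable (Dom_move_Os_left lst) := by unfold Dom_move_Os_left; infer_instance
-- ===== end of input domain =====

-- B rebuilds the list in one left-to-right pass with per-'#'-segment accumulators instead of A's
-- per-'O' backward bubble of adjacent swaps; the equivalence proved is about the RETURN value only:
-- Python A mutates lst in place, B does not.

-- ===== PORT A =====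
-- swap lst[j], lst[j+1]
def pvSwap (l : List String) (j : Nat) : List String :=
  (l.set j (l.getD (j + 1) "")).set (j + 1) (l.getD j "")

-- inner loop: for j in range(i-1,-1,-1): if lst[j]=="#": break; swap — called with j = i-1
def pvInner (l : List String) (j : Nat) : List String :=
  if l.getD j "" = "#" then l
  else
    let l' := pvSwap l j
    match j with
    | 0 => l'
    | j' + 1 => pvInner l' j'

def pvStep (l : List String) (i : Nat) : List String :=
  if l.getD i "" = "O" then
    match i with
    | 0 => l            -- range(-1,-1,-1) is empty
    | i' + 1 => pvInner l i'
  else l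

def move_Os_left (lst : List String) : List String :=
  (List.range lst.length).foldl pvStep lst

-- ===== PORT B =====
def pvAltGo (xs done : List String) (c : Nat) (pending : List String) : List String :=
  match xs with
  | [] => done ++ List.replicate c "O" ++ pending
  | x :: xs' =>
    if x = "#" then pvAltGo xs' (done ++ List.replicate c "O" ++ pending ++ ["#"]) 0 []
    else if x = "O" then pvAltGo xs' done (c + 1) pending
    else pvAltGo xs' done c (pending ++ [x])

def move_Os_left_alt (lst : List String) : List String :=
  pvAltGo lst [] 0 []

-- ===== PRECONDITION & SPEC =====
def Spec_move_Os_left (lst : List String) (out : List String) : Prop := out = move_Os_left_alt lst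
instance (lst : List String) (out : List String) : Decidable (Spec_move_Os_left lst out) := by unfold Spec_move_Os_left; infer_instance

-- ===== CLAIM (what is proved, stated in full; the proofs are below) =====
def Claim_equal_move_Os_left : Prop := ∀ (lst : List String), Dom_move_Os_left lst → Spec_move_Os_left lst (move_Os_left lst)

-- ===== LEMMAS AND PROOFS =====

theorem pv_getD_at (u : List String) (x : String) (v : List String) :
    (u ++ x :: v).getD u.length "" = x := by
  induction u with
  | nil => rfl
  | cons a u ih => simpa using ih

theorem pv_swap_adj (u : List String) (a b : String) (v : List String) :
    pvSwap (u ++ a :: b :: v) u.length = u ++ b :: a :: v := by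
  induction u with
  | nil => rfl
  | cons c u ih =>
    simp only [pvSwap] at ih ⊢
    simpa using ih

theorem pvInner_spec (s t rest : List String)
    (hs : s = [] ∨ ∃ s', s = s' ++ ["#"])
    (ht : ∀ x ∈ t, x ≠ "#")
    (hne : s ≠ [] ∨ t ≠ []) :
    pvInner (s ++ t ++ "O" :: rest) (s.length + t.length - 1) = s ++ "O" :: (t ++ rest) := by
  induction t using List.reverseRecOn generalizing rest with
  | nil =>
    rcases hs with h | ⟨s', rfl⟩
    · exact absurd h (hne.resolve_right (fun h' => h' rfl))
    · rw [pvInner]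
      have : (s' ++ ["#"] ++ ([] : List String) ++ "O" :: rest).getD ((s' ++ ["#"]).length + ([] : List String).length - 1) "" = "#" := by
        simpa using pv_getD_at s' "#" ("O" :: rest)
      simp [this]
  | append_singleton t' a ih =>
    have ha : a ≠ "#" := ht a (by simp)
    have hj : (s ++ (t' ++ [a]) ++ "O" :: rest).getD (s.length + (t' ++ [a]).length - 1) "" = a := by
      have := pv_getD_at (s ++ t') a ("O" :: rest)
      simpa [List.append_assoc, Nat.add_comm] using this
    rw [pvInner, hj]
    rw [if_neg ha]
    have hswap : pvSwap (s ++ (t' ++ [a]) ++ "O" :: rest) (s.length + (t' ++ [a]).length - 1)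
        = s ++ t' ++ "O" :: a :: rest := by
      have := pv_swap_adj (s ++ t') a "O" rest
      simpa [List.append_assoc, Nat.add_comm] using this
    have hlen : s.length + (t' ++ [a]).length - 1 = s.length + t'.length := by
      simp only [List.length_append, List.length_cons, List.length_nil]; omega
    rw [hlen] at hswap ⊢
    rw [hswap]
    cases hc : s.length + t'.length with
    | zero =>
      have hs0 : s = [] := by
        cases s with
        | nil => rfl
        | cons _ _ => simp at hc
      have ht0 : t' = [] := by
        cases t' with
        | nil => rfl
        | cons _ _ => simp at hc
      subst hs0; subst ht0; simp
    | succ m =>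
      have hne' : s ≠ [] ∨ t' ≠ [] := by
        by_contra h
        push_neg at h
        rcases h with ⟨h1, h2⟩
        subst h1; subst h2; simp at hc
      have := ih (a :: rest) (fun x hx => ht x (by simp [hx])) hne'
      have hm : m = s.length + t'.length - 1 := by omega
      subst hm
      show pvInner (s ++ t' ++ "O" :: a :: rest) (s.length + t'.length - 1)
          = s ++ "O" :: (t' ++ [a] ++ rest)
      rw [this]
      simp

theorem pv_range'_foldl (s n : Nat) (f : List String → Nat → List String) (init : List String) :
    (List.range' s (n + 1)).foldl f init = (List.range' (s + 1) n).foldl f (f init s) := by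
  rw [List.range'_succ]; rfl

theorem pv_key (xs : List String) : ∀ (done : List String) (c : Nat) (pend : List String),
    (done = [] ∨ ∃ d', done = d' ++ ["#"]) →
    (∀ x ∈ pend, x ≠ "#") → (∀ x ∈ pend, x ≠ "O") →
    (List.range' (done ++ List.replicate c "O" ++ pend).length xs.length).foldl pvStep
        (done ++ List.replicate c "O" ++ pend ++ xs)
      = pvAltGo xs done c pend := by
  induction xs with
  | nil => intro done c pend _ _ _; simp [pvAltGo]
  | cons x xs ih =>
    intro done c pend hd hp hpO
    set front := done ++ List.replicate c "O" ++ pend with hfront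
    have hget : (front ++ x :: xs).getD front.length "" = x := pv_getD_at front x xs
    rw [show front ++ (x :: xs) = front ++ x :: xs by rfl] at *
    rw [show (x :: xs).length = xs.length + 1 by rfl, pv_range'_foldl]
    by_cases hO : x = "O"
    · subst hO
      have hstep : pvStep (front ++ "O" :: xs) front.length = done ++ List.replicate (c+1) "O" ++ pend ++ xs := by
        unfold pvStep
        rw [hget, if_pos rfl]
        cases hfl : front.length with
        | zero =>
          have h0 : front = [] := List.eq_nil_of_length_eq_zero hfl
          have h0' := h0
          rw [hfront] at h0'
          have h1 : done = [] := by
            cases done with | nil => rfl | cons _ _ => simp at h0'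
          have h2 : c = 0 := by
            cases c with | zero => rfl | succ _ => rw [h1] at h0'; simp [List.replicate] at h0'
          have h3 : pend = [] := by
            cases pend with | nil => rfl | cons _ _ => simp at h0'
          subst h1; subst h2; subst h3
          show front ++ "O" :: xs = [] ++ List.replicate 1 "O" ++ [] ++ xs
          rw [h0]
          simp [List.replicate]
        | succ i' =>
          have hne : done ≠ [] ∨ (List.replicate c "O" ++ pend) ≠ [] := by
            by_contra h
            push_neg at h
            rcases h with ⟨h1, h2⟩
            have : front = [] := by rw [hfront, h1]; simpa using h2
            rw [this] at hfl; simp at hfl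
          have hi' : i' = done.length + (List.replicate c "O" ++ pend).length - 1 := by
            have : front.length = done.length + (List.replicate c "O" ++ pend).length := by
              rw [hfront]; simp
            omega
          have ht : ∀ y ∈ List.replicate c "O" ++ pend, y ≠ "#" := by
            intro y hy
            rcases List.mem_append.mp hy with h | h
            · rw [List.eq_of_mem_replicate h]; decide
            · exact hp y h
          have hspec := pvInner_spec done (List.replicate c "O" ++ pend) xs hd ht hne
          show pvInner (front ++ "O" :: xs) i' = done ++ List.replicate (c+1) "O" ++ pend ++ xs
          rw [hi']
          rw [show front ++ "O" :: xs = done ++ (List.replicate c "O" ++ pend) ++ "O" :: xs by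
            rw [hfront]; simp]
          rw [hspec]
          simp [List.replicate_succ]
      rw [hstep]
      have hlen : (done ++ List.replicate (c+1) "O" ++ pend).length = front.length + 1 := by
        rw [hfront]; simp; omega
      have := ih done (c+1) pend hd hp hpO
      rw [hlen] at this
      rw [this]
      simp [pvAltGo]
    · have hstep : pvStep (front ++ x :: xs) front.length = front ++ x :: xs := by
        unfold pvStep
        rw [hget]
        simp [hO]
      rw [hstep]
      by_cases hH : x = "#"
      · subst hH
        have hd' : (done ++ List.replicate c "O" ++ pend ++ ["#"]) = [] ∨
            ∃ d', (done ++ List.replicate c "O" ++ pend ++ ["#"]) = d' ++ ["#"] := by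
          right; exact ⟨done ++ List.replicate c "O" ++ pend, by simp⟩
        have := ih (done ++ List.replicate c "O" ++ pend ++ ["#"]) 0 [] hd' (by simp) (by simp)
        have hlen : (done ++ List.replicate c "O" ++ pend ++ ["#"] ++ List.replicate 0 "O" ++ []).length
            = front.length + 1 := by rw [hfront]; simp; omega
        rw [hlen] at this
        rw [show (done ++ List.replicate c "O" ++ pend ++ ["#"] ++ List.replicate 0 "O" ++ []) ++ xs
              = front ++ "#" :: xs by rw [hfront]; simp] at this
        rw [this]
        simp [pvAltGo]
      · have hp' : ∀ y ∈ pend ++ [x], y ≠ "#" := by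
          intro y hy; rcases List.mem_append.mp hy with h | h
          · exact hp y h
          · simp at h; subst h; exact hH
        have hpO' : ∀ y ∈ pend ++ [x], y ≠ "O" := by
          intro y hy; rcases List.mem_append.mp hy with h | h
          · exact hpO y h
          · simp at h; subst h; exact hO
        have := ih done c (pend ++ [x]) hd hp' hpO'
        have hlen : (done ++ List.replicate c "O" ++ (pend ++ [x])).length = front.length + 1 := by
          rw [hfront]; simp; omega
        rw [hlen] at this
        rw [show (done ++ List.replicate c "O" ++ (pend ++ [x])) ++ xs = front ++ x :: xs by
          rw [hfront]; simp] at this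
        rw [this]
        simp [pvAltGo, hO, hH]

-- ===== VERDICT (by name: the statement is the Claim_ definition above) =====
theorem move_Os_left_spec : Claim_equal_move_Os_left := by
  intro lst _
  show move_Os_left lst = move_Os_left_alt lst
  unfold move_Os_left move_Os_left_alt
  have := pv_key lst [] 0 []
    (Or.inl rfl) (by simp) (by simp)
  simpa [List.range_eq_range'] using this
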